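-- pv_equiv track=rewrite | github.com/wzxie/Genome-Repair-Tools | scripts/extract_gap_patches.py | _find_surrounding_alignments
-- ===== SOURCE A (Python) =====
-- from typing import List, Dict, Tuple, Optional, Any, Union
--
-- def _find_surrounding_alignments(alignments: List[Tuple], gap_pos: int,
--                                require_both: bool = True) -> Tuple[Optional[Tuple], Optional[Tuple]]:
--     """Find closest left and right syntenic blocks around gap"""
--     left_candidates = []
--     right_candidates = []
--
--     for align in alignments:
--         _, _, qry_start, qry_end, _, _ = align
--         q_min = min(qry_start, qry_end)
--         q_max = max(qry_start, qry_end)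
--
--         if q_max <= gap_pos:
--             left_candidates.append((q_max, align))
--         elif q_min > gap_pos:
--             right_candidates.append((q_min, align))
--
--     before_align = max(left_candidates, key=lambda x: x[0])[1] if left_candidates else None
--     after_align = min(right_candidates, key=lambda x: x[0])[1] if right_candidates else None
--
--     if require_both and (before_align is None or after_align is None):
--         return None, None
--
--     return before_align, after_align
-- ===== SOURCE B (Python) =====
-- def _find_surrounding_alignments(alignments, gap_pos, require_both=True):
--     """Single pass keeping running best-left / best-right instead of building
--     candidate lists and reducing with max/min."""
--     before_align = None
--     before_key = None
--     after_align = None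
--     after_key = None
--     for align in alignments:
--         _, _, qry_start, qry_end, _, _ = align
--         if qry_start <= qry_end:
--             q_min, q_max = qry_start, qry_end
--         else:
--             q_min, q_max = qry_end, qry_start
--         if q_max <= gap_pos:
--             if before_align is None or q_max > before_key:
--                 before_align, before_key = align, q_max
--         elif q_min > gap_pos:
--             if after_align is None or q_min < after_key:
--                 after_align, after_key = align, q_min
--     if require_both and (before_align is None or after_align is None):
--         return None, None
--     return before_align, after_align
-- ===== Notes on version B (the rewrite author's own statement) =====
-- stated objective: simpler
-- what changed: Replaced the build-two-candidate-lists-then-max/min structure with a single pass that maintains running best-left/best-right alignments (strict comparisons reproduce Python's first-extreme tie behaviour), using O(1) extra space instead of two lists.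
import Mathlib
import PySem

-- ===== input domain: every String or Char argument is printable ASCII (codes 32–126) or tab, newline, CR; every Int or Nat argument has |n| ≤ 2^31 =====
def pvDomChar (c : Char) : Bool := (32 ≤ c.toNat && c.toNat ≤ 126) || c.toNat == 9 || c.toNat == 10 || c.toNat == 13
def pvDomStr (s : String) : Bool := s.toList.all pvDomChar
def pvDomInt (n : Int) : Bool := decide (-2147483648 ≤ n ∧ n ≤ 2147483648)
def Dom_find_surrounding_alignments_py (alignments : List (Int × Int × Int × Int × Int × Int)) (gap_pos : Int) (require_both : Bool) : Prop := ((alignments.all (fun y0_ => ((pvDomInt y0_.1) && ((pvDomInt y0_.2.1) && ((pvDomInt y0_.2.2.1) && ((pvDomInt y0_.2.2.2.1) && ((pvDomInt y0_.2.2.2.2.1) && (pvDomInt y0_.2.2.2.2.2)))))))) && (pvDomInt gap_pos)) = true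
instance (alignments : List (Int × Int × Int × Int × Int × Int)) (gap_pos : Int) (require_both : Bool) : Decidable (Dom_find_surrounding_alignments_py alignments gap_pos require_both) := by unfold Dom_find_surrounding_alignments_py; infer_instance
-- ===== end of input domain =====

-- B replaces A's build-two-candidate-lists-then-max/min with a single pass keeping running
-- best-left/best-right alignments (simpler: O(1) extra space, one reduction step per element).

-- ===== PORT A =====
-- Python's max(xs, key=lambda x: x[0]) / min(...): first element with extremal key (strict replace).
def pyMaxByFst (xs : List (Int × (Int × Int × Int × Int × Int × Int))) : Option (Int × (Int × Int × Int × Int × Int × Int)) :=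
  xs.foldl (fun acc x => match acc with
    | none => some x
    | some m => if x.1 > m.1 then some x else some m) none

def pyMinByFst (xs : List (Int × (Int × Int × Int × Int × Int × Int))) : Option (Int × (Int × Int × Int × Int × Int × Int)) :=
  xs.foldl (fun acc x => match acc with
    | none => some x
    | some m => if x.1 < m.1 then some x else some m) none

-- one iteration of A's candidate-collecting loop
def stepA (gap_pos : Int) (acc : List (Int × (Int × Int × Int × Int × Int × Int)) × List (Int × (Int × Int × Int × Int × Int × Int))) (align : (Int × Int × Int × Int × Int × Int)) :
    List (Int × (Int × Int × Int × Int × Int × Int)) × List (Int × (Int × Int × Int × Int × Int × Int)) :=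
  let q_min := min align.2.2.1 align.2.2.2.1
  let q_max := max align.2.2.1 align.2.2.2.1
  if q_max ≤ gap_pos then (acc.1 ++ [(q_max, align)], acc.2)
  else if q_min > gap_pos then (acc.1, acc.2 ++ [(q_min, align)])
  else acc

def find_surrounding_alignments_py (alignments : List (Int × Int × Int × Int × Int × Int)) (gap_pos : Int) (require_both : Bool) : (Option (Int × Int × Int × Int × Int × Int)) × (Option (Int × Int × Int × Int × Int × Int)) :=
  let cands := alignments.foldl (stepA gap_pos) ([], [])
  let before_align := (pyMaxByFst cands.1).map Prod.snd
  let after_align := (pyMinByFst cands.2).map Prod.snd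
  if require_both && (before_align.isNone || after_align.isNone) then (none, none)
  else (before_align, after_align)

-- ===== PORT B =====
-- one iteration of B's running-best loop (state: optional (key, alignment) for each side)
def stepB (gap_pos : Int) (acc : Option (Int × (Int × Int × Int × Int × Int × Int)) × Option (Int × (Int × Int × Int × Int × Int × Int))) (align : (Int × Int × Int × Int × Int × Int)) :
    Option (Int × (Int × Int × Int × Int × Int × Int)) × Option (Int × (Int × Int × Int × Int × Int × Int)) :=
  let qs := align.2.2.1
  let qe := align.2.2.2.1
  let p := if qs ≤ qe then (qs, qe) else (qe, qs)
  if p.2 ≤ gap_pos then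
    match acc.1 with
    | none => (some (p.2, align), acc.2)
    | some m => if p.2 > m.1 then (some (p.2, align), acc.2) else acc
  else if p.1 > gap_pos then
    match acc.2 with
    | none => (acc.1, some (p.1, align))
    | some m => if p.1 < m.1 then (acc.1, some (p.1, align)) else acc
  else acc

def find_surrounding_alignments_py_alt (alignments : List (Int × Int × Int × Int × Int × Int)) (gap_pos : Int) (require_both : Bool) : (Option (Int × Int × Int × Int × Int × Int)) × (Option (Int × Int × Int × Int × Int × Int)) :=
  let best := alignments.foldl (stepB gap_pos) (none, none)
  let before_align := best.1.map Prod.snd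
  let after_align := best.2.map Prod.snd
  if require_both && (before_align.isNone || after_align.isNone) then (none, none)
  else (before_align, after_align)

-- ===== PRECONDITION & SPEC =====
def Spec_find_surrounding_alignments_py (alignments : List (Int × Int × Int × Int × Int × Int)) (gap_pos : Int) (require_both : Bool) (out : (Option (Int × Int × Int × Int × Int × Int)) × (Option (Int × Int × Int × Int × Int × Int))) : Prop := out = find_surrounding_alignments_py_alt alignments gap_pos require_both
instance (alignments : List (Int × Int × Int × Int × Int × Int)) (gap_pos : Int) (require_both : Bool) (out : (Option (Int × Int × Int × Int × Int × Int)) × (Option (Int × Int × Int × Int × Int × Int))) : Decidable (Spec_find_surrounding_alignments_py alignments gap_pos require_both out) := by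
  unfold Spec_find_surrounding_alignments_py
  have h : DecidableEq (Option (Int × Int × Int × Int × Int × Int)) := fun x y => inferInstance
  exact @instDecidableEqProd _ _ h h _ _

-- ===== CLAIM (what is proved, stated in full; the proofs are below) =====
def Claim_equal_find_surrounding_alignments_py : Prop := ∀ (alignments : List (Int × Int × Int × Int × Int × Int)) (gap_pos : Int) (require_both : Bool), Dom_find_surrounding_alignments_py alignments gap_pos require_both → Spec_find_surrounding_alignments_py alignments gap_pos require_both (find_surrounding_alignments_py alignments gap_pos require_both)

-- ===== LEMMAS AND PROOFS =====
theorem pyMaxByFst_append_singleton (L : List (Int × (Int × Int × Int × Int × Int × Int))) (x : Int × (Int × Int × Int × Int × Int × Int)) :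
    pyMaxByFst (L ++ [x]) = match pyMaxByFst L with
      | none => some x
      | some m => if x.1 > m.1 then some x else some m := by
  simp [pyMaxByFst, List.foldl_append]

theorem pyMinByFst_append_singleton (L : List (Int × (Int × Int × Int × Int × Int × Int))) (x : Int × (Int × Int × Int × Int × Int × Int)) :
    pyMinByFst (L ++ [x]) = match pyMinByFst L with
      | none => some x
      | some m => if x.1 < m.1 then some x else some m := by
  simp [pyMinByFst, List.foldl_append]

theorem loop_eq (gap_pos : Int) (xs : List (Int × Int × Int × Int × Int × Int)) :
    ∀ (L R : List (Int × (Int × Int × Int × Int × Int × Int))),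
      (pyMaxByFst (xs.foldl (stepA gap_pos) (L, R)).1,
       pyMinByFst (xs.foldl (stepA gap_pos) (L, R)).2)
      = xs.foldl (stepB gap_pos) (pyMaxByFst L, pyMinByFst R) := by
  induction xs with
  | nil => intro L R; simp
  | cons x xs ih =>
    intro L R
    have hmin : min x.2.2.1 x.2.2.2.1 = if x.2.2.1 ≤ x.2.2.2.1 then x.2.2.1 else x.2.2.2.1 :=
      min_def ..
    have hmax : max x.2.2.1 x.2.2.2.1 = if x.2.2.1 ≤ x.2.2.2.1 then x.2.2.2.1 else x.2.2.1 :=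
      max_def ..
    simp only [List.foldl_cons]
    rw [show stepB gap_pos (pyMaxByFst L, pyMinByFst R) x
          = (pyMaxByFst (stepA gap_pos (L, R) x).1, pyMinByFst (stepA gap_pos (L, R) x).2) by
      simp only [stepA, stepB, hmin, hmax]
      by_cases hle : x.2.2.1 ≤ x.2.2.2.1 <;>
        simp only [hle, if_true, if_false] <;>
        split_ifs <;>
        simp_all [pyMaxByFst_append_singleton, pyMinByFst_append_singleton] <;>
        (try cases h1 : pyMaxByFst L) <;> (try cases h2 : pyMinByFst R) <;>
        simp_all <;> split_ifs <;> simp_all]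
    exact ih _ _

-- ===== VERDICT (by name: the statement is the Claim_ definition above) =====
theorem find_surrounding_alignments_py_spec : Claim_equal_find_surrounding_alignments_py := by
  intro alignments gap_pos require_both _
  unfold Spec_find_surrounding_alignments_py
  unfold find_surrounding_alignments_py find_surrounding_alignments_py_alt
  have h := loop_eq gap_pos alignments [] []
  simp only [pyMaxByFst, pyMinByFst, List.foldl_nil] at h
  rw [show (alignments.foldl (stepB gap_pos) (none, none)) =
      (pyMaxByFst (alignments.foldl (stepA gap_pos) ([], [])).1,
       pyMinByFst (alignments.foldl (stepA gap_pos) ([], [])).2) by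
    rw [loop_eq gap_pos alignments [] []]; simp [pyMaxByFst, pyMinByFst]]
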